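-- pv_equiv track=rewrite | github.com/Oliverpickert/p2-DesSoft | funcoes.py | calcula_pontos_sequencia_alta
-- ===== SOURCE A (Python) =====
-- def calcula_pontos_sequencia_alta(dados_rolados: list[int]):
--     if len(dados_rolados) < 5:
--         return 0
--     dados_ordenados = sorted(dados_rolados)
--     dados_unicos = []
--     for dado in dados_ordenados:
--         if dado not in dados_unicos:
--             dados_unicos.append(dado)
--     if len(dados_unicos) < 5:
--         return 0
--     for i in range(len(dados_unicos) - 4):
--         if (dados_unicos[i] + 1 == dados_unicos[i+1] and
--             dados_unicos[i+1] + 1 == dados_unicos[i+2] and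
--             dados_unicos[i+2] + 1 == dados_unicos[i+3] and
--             dados_unicos[i+3] + 1 == dados_unicos[i+4]):
--             return 30
--     return 0
-- ===== SOURCE B (Python) =====
-- def calcula_pontos_sequencia_alta(dados_rolados: list[int]):
--     valores = set(dados_rolados)
--     if any(v + 1 in valores and v + 2 in valores and v + 3 in valores and v + 4 in valores
--            for v in valores):
--         return 30
--     return 0
-- ===== Notes on version B (the rewrite author's own statement) =====
-- stated objective: faster
-- what changed: Replaces sort + quadratic list-based dedup + windowed scan with a single hash set and membership probes for v+1..v+4 from each distinct value.
import Mathlib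
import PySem

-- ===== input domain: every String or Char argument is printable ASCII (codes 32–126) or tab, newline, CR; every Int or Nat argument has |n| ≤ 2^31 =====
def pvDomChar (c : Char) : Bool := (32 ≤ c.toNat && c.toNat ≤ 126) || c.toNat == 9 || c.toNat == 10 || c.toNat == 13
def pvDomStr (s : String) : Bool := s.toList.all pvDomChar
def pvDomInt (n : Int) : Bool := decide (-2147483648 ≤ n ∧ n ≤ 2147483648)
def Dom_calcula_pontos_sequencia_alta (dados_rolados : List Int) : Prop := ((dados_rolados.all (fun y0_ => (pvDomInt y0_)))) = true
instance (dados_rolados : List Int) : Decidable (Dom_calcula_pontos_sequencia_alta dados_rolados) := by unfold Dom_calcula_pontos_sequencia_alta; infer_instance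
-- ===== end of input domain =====

-- B replaces A's sort + quadratic list dedup + windowed index scan by a set with
-- membership probes for v+1..v+4 from each distinct value (objective: faster).

-- ===== PORT A =====
-- the 'for i in range(len(dados_unicos) - 4)' window scan, as structural recursion
-- over the same sliding window of five entries
def pvScanA : List Int → Int
  | a :: b :: c :: d :: e :: rest =>
      if a + 1 = b ∧ b + 1 = c ∧ c + 1 = d ∧ d + 1 = e then 30
      else pvScanA (b :: c :: d :: e :: rest)
  | _ => 0

def calcula_pontos_sequencia_alta (dados_rolados : List Int) : Int :=
  if dados_rolados.length < 5 then 0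
  else
    let dados_ordenados := PySem.List.sorted dados_rolados (fun x => x) false
    let dados_unicos := dados_ordenados.foldl
      (fun acc dado => if dado ∈ acc then acc else acc ++ [dado]) []
    if dados_unicos.length < 5 then 0
    else pvScanA dados_unicos

-- ===== PORT B =====
-- 'any(v+1 in valores and ... for v in valores)' over the set, then 30 / 0
def pvAltProbe (valores : PySem.Set Int) : Int :=
  if valores.any (fun v => decide (v + 1 ∈ valores) && decide (v + 2 ∈ valores) &&
      decide (v + 3 ∈ valores) && decide (v + 4 ∈ valores)) then 30
  else 0

def calcula_pontos_sequencia_alta_alt (dados_rolados : List Int) : Int :=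
  pvAltProbe (PySem.Set.ofList dados_rolados)

-- ===== PRECONDITION & SPEC =====
def Spec_calcula_pontos_sequencia_alta (dados_rolados : List Int) (out : Int) : Prop := out = calcula_pontos_sequencia_alta_alt dados_rolados
instance (dados_rolados : List Int) (out : Int) : Decidable (Spec_calcula_pontos_sequencia_alta dados_rolados out) := by unfold Spec_calcula_pontos_sequencia_alta; infer_instance

-- ===== CLAIM (what is proved, stated in full; the proofs are below) =====
def Claim_equal_calcula_pontos_sequencia_alta : Prop := ∀ (dados_rolados : List Int), Dom_calcula_pontos_sequencia_alta dados_rolados → Spec_calcula_pontos_sequencia_alta dados_rolados (calcula_pontos_sequencia_alta dados_rolados)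

-- ===== LEMMAS AND PROOFS =====

-- the condition both programs decide
def pvHasRun (xs : List Int) : Prop :=
  ∃ v, v ∈ xs ∧ v + 1 ∈ xs ∧ v + 2 ∈ xs ∧ v + 3 ∈ xs ∧ v + 4 ∈ xs

-- membership in A's dedup accumulator
theorem pv_mem_dedup_foldl (l acc : List Int) (x : Int) :
    x ∈ l.foldl (fun acc dado => if dado ∈ acc then acc else acc ++ [dado]) acc ↔
      x ∈ acc ∨ x ∈ l := by
  induction l generalizing acc with
  | nil => simp
  | cons b t ih =>
      simp only [List.foldl_cons]
      by_cases hb : b ∈ acc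
      · simp only [hb, if_true, ih, List.mem_cons]
        constructor
        · rintro (h | h) <;> tauto
        · rintro (h | h | h)
          · tauto
          · subst h; tauto
          · tauto
      · simp only [hb, if_false, ih, List.mem_append, List.mem_cons]
        tauto

-- A's dedup accumulator stays nodup
theorem pv_nodup_dedup_foldl (l : List Int) (acc : List Int) (hacc : acc.Nodup) :
    (l.foldl (fun acc dado => if dado ∈ acc then acc else acc ++ [dado]) acc).Nodup := by
  induction l generalizing acc with
  | nil => simpa
  | cons b t ih =>
      simp only [List.foldl_cons]
      by_cases hb : b ∈ acc
      · simpa [hb] using ih acc hacc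
      · simp only [hb, if_false]
        refine ih _ ?_
        rw [List.nodup_append]
        refine ⟨hacc, List.nodup_singleton b, ?_⟩
        intro a ha c hc
        rw [List.mem_singleton] at hc
        intro h
        rw [hc] at h
        exact hb (h ▸ ha)

-- A's dedup of a (≤)-sorted list stays (≤)-sorted
theorem pv_pairwise_dedup_foldl (l acc : List Int)
    (hl : l.Pairwise (· ≤ ·)) (hacc : acc.Pairwise (· ≤ ·))
    (hcross : ∀ a ∈ acc, ∀ b ∈ l, a ≤ b) :
    (l.foldl (fun acc dado => if dado ∈ acc then acc else acc ++ [dado]) acc).Pairwise (· ≤ ·) := by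
  induction l generalizing acc with
  | nil => simpa
  | cons x0 t ih =>
      rw [List.pairwise_cons] at hl
      simp only [List.foldl_cons]
      by_cases hx : x0 ∈ acc
      · simp only [hx, if_true]
        exact ih acc hl.2 hacc (fun a ha c hc => hcross a ha c (by simp [hc]))
      · simp only [hx, if_false]
        refine ih _ hl.2 ?_ ?_
        · refine List.pairwise_append.mpr ⟨hacc, by simp, ?_⟩
          intro a ha c hc
          rw [List.mem_singleton] at hc
          rw [hc]
          exact hcross a ha x0 (by simp)
        · intro a ha c hc
          rcases List.mem_append.mp ha with h | h
          · exact hcross a h c (by simp [hc])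
          · rw [List.mem_singleton] at h
            rw [h]
            exact hl.1 c hc

theorem pv_scan_zero_or_thirty (l : List Int) : pvScanA l = 0 ∨ pvScanA l = 30 := by
  match l with
  | a :: b :: c :: d :: e :: rest =>
      rw [pvScanA]
      split
      · right; rfl
      · exact pv_scan_zero_or_thirty (b :: c :: d :: e :: rest)
  | [] => left; rfl
  | [_] => left; rfl
  | [_, _] => left; rfl
  | [_, _, _] => left; rfl
  | [_, _, _, _] => left; rfl
termination_by l.length

theorem pv_scan_thirty_run (l : List Int) (h : pvScanA l = 30) : pvHasRun l := by
  match l with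
  | a :: b :: c :: d :: e :: rest =>
      rw [pvScanA] at h
      split at h
      · rename_i hcond
        obtain ⟨h1, h2, h3, h4⟩ := hcond
        have hb : b = a + 1 := by omega
        have hc : c = a + 2 := by omega
        have hd : d = a + 3 := by omega
        have he : e = a + 4 := by omega
        subst hb; subst hc; subst hd; subst he
        exact ⟨a, by simp, by simp, by simp, by simp, by simp⟩
      · obtain ⟨v, hv0, hv1, hv2, hv3, hv4⟩ := pv_scan_thirty_run (b :: c :: d :: e :: rest) h
        exact ⟨v, List.mem_cons_of_mem a hv0, List.mem_cons_of_mem a hv1,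
          List.mem_cons_of_mem a hv2, List.mem_cons_of_mem a hv3, List.mem_cons_of_mem a hv4⟩
  | [] => simp [pvScanA] at h
  | [_] => simp [pvScanA] at h
  | [_, _] => simp [pvScanA] at h
  | [_, _, _] => simp [pvScanA] at h
  | [_, _, _, _] => simp [pvScanA] at h
termination_by l.length

theorem pv_scan_cons_thirty (a : Int) (t : List Int) (h : pvScanA t = 30) :
    pvScanA (a :: t) = 30 := by
  match t with
  | b :: c :: d :: e :: rest =>
      rw [pvScanA]
      split
      · rfl
      · exact h
  | [] => simp [pvScanA] at h
  | [_] => simp [pvScanA] at h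
  | [_, _] => simp [pvScanA] at h
  | [_, _, _] => simp [pvScanA] at h

theorem pv_run_scan_thirty (l : List Int) (hp : l.Pairwise (· < ·))
    (h : pvHasRun l) : pvScanA l = 30 := by
  induction l with
  | nil => obtain ⟨v, hv, _⟩ := h; simp at hv
  | cons a t ih =>
      obtain ⟨v, hv0, hv1, hv2, hv3, hv4⟩ := h
      rw [List.pairwise_cons] at hp
      by_cases hva : v = a
      · subst hva
        -- all of v+1..v+4 exceed the head v, hence sit in the tail; pairwise (<)
        -- forces them to be exactly the next four elements
        have m1 : v + 1 ∈ t := (List.mem_cons.mp hv1).resolve_left (by omega)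
        have m2 : v + 2 ∈ t := (List.mem_cons.mp hv2).resolve_left (by omega)
        have m3 : v + 3 ∈ t := (List.mem_cons.mp hv3).resolve_left (by omega)
        have m4 : v + 4 ∈ t := (List.mem_cons.mp hv4).resolve_left (by omega)
        match t, hp.2, hp.1, m1, m2, m3, m4 with
        | b :: t1, hpt, hlt, m1, m2, m3, m4 =>
          rw [List.pairwise_cons] at hpt
          have hb : b = v + 1 := by
            have hbv : v < b := hlt b (by simp)
            rcases List.mem_cons.mp m1 with h | h
            · omega
            · have := hpt.1 _ h; omega
          subst hb
          have n2 : v + 2 ∈ t1 := (List.mem_cons.mp m2).resolve_left (by omega)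
          have n3 : v + 3 ∈ t1 := (List.mem_cons.mp m3).resolve_left (by omega)
          have n4 : v + 4 ∈ t1 := (List.mem_cons.mp m4).resolve_left (by omega)
          match t1, hpt.2, hpt.1, n2, n3, n4 with
          | c :: t2, hpt2, hlt2, n2, n3, n4 =>
            rw [List.pairwise_cons] at hpt2
            have hc : c = v + 2 := by
              have := hlt2 c (by simp)
              rcases List.mem_cons.mp n2 with h | h
              · omega
              · have := hpt2.1 _ h; omega
            subst hc
            have p3 : v + 3 ∈ t2 := (List.mem_cons.mp n3).resolve_left (by omega)
            have p4 : v + 4 ∈ t2 := (List.mem_cons.mp n4).resolve_left (by omega)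
            match t2, hpt2.2, hpt2.1, p3, p4 with
            | d :: t3, hpt3, hlt3, p3, p4 =>
              rw [List.pairwise_cons] at hpt3
              have hd : d = v + 3 := by
                have := hlt3 d (by simp)
                rcases List.mem_cons.mp p3 with h | h
                · omega
                · have := hpt3.1 _ h; omega
              subst hd
              have q4 : v + 4 ∈ t3 := (List.mem_cons.mp p4).resolve_left (by omega)
              match t3, hpt3.2, hpt3.1, q4 with
              | e :: t4, hpt4, hlt4, q4 =>
                rw [List.pairwise_cons] at hpt4
                have he : e = v + 4 := by
                  have := hlt4 e (by simp)
                  rcases List.mem_cons.mp q4 with h | h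
                  · omega
                  · have := hpt4.1 _ h; omega
                subst he
                rw [pvScanA, if_pos (by omega)]
      · -- v ≠ a: the whole run lies in the tail
        have hm0 : v ∈ t := (List.mem_cons.mp hv0).resolve_left (by omega)
        have hvb : a < v := hp.1 v hm0
        have hm1 : v + 1 ∈ t := (List.mem_cons.mp hv1).resolve_left (by omega)
        have hm2 : v + 2 ∈ t := (List.mem_cons.mp hv2).resolve_left (by omega)
        have hm3 : v + 3 ∈ t := (List.mem_cons.mp hv3).resolve_left (by omega)
        have hm4 : v + 4 ∈ t := (List.mem_cons.mp hv4).resolve_left (by omega)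
        exact pv_scan_cons_thirty a t (ih hp.2 ⟨v, hm0, hm1, hm2, hm3, hm4⟩)

theorem pv_scan_short (l : List Int) (h : l.length < 5) : pvScanA l = 0 := by
  match l with
  | [] => rfl
  | [_] => rfl
  | [_, _] => rfl
  | [_, _, _] => rfl
  | [_, _, _, _] => rfl
  | _ :: _ :: _ :: _ :: _ :: _ => exact absurd h (by simp)

-- B returns 30 exactly on pvHasRun …
theorem pv_alt_thirty (dados : List Int) :
    calcula_pontos_sequencia_alta_alt dados = 30 ↔ pvHasRun dados := by
  unfold calcula_pontos_sequencia_alta_alt pvAltProbe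
  have hmem : ∀ x : Int, x ∈ PySem.Set.ofList dados ↔ x ∈ dados :=
    fun x => PySem.Set.mem_ofList dados x
  split
  · rename_i h1
    simp only [true_iff]
    rcases List.any_eq_true.mp h1 with ⟨v, hv, hc⟩
    simp only [Bool.and_eq_true, decide_eq_true_eq] at hc
    exact ⟨v, (hmem v).mp hv, (hmem _).mp hc.1.1.1, (hmem _).mp hc.1.1.2,
      (hmem _).mp hc.1.2, (hmem _).mp hc.2⟩
  · rename_i h1
    constructor
    · intro h; norm_num at h
    · rintro ⟨v, hv0, hv1, hv2, hv3, hv4⟩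
      exfalso
      apply h1
      refine List.any_eq_true.mpr ⟨v, (hmem v).mpr hv0, ?_⟩
      simp only [Bool.and_eq_true, decide_eq_true_eq]
      exact ⟨⟨⟨(hmem _).mpr hv1, (hmem _).mpr hv2⟩, (hmem _).mpr hv3⟩, (hmem _).mpr hv4⟩

-- … and is always 0 or 30
theorem pv_alt_cases (dados : List Int) :
    calcula_pontos_sequencia_alta_alt dados = 0 ∨ calcula_pontos_sequencia_alta_alt dados = 30 := by
  unfold calcula_pontos_sequencia_alta_alt pvAltProbe
  split
  · right; rfl
  · left; rfl

-- the dedup list of A: abbreviation used only in the proofs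
def pvUni (dados : List Int) : List Int :=
  (PySem.List.sorted dados (fun x => x) false).foldl
    (fun acc dado => if dado ∈ acc then acc else acc ++ [dado]) []

theorem pv_uni_mem (dados : List Int) (x : Int) : x ∈ pvUni dados ↔ x ∈ dados := by
  unfold pvUni
  rw [pv_mem_dedup_foldl]
  simp [PySem.List.mem_sorted]

theorem pv_uni_pairwise (dados : List Int) : (pvUni dados).Pairwise (· < ·) := by
  have hle : (pvUni dados).Pairwise (· ≤ ·) :=
    pv_pairwise_dedup_foldl _ []
      (by simpa using PySem.List.sorted_pairwise (xs := dados) (key := fun x => x))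
      (by simp) (by simp)
  have hnd : (pvUni dados).Nodup := pv_nodup_dedup_foldl _ [] (by simp)
  exact (hle.and hnd).imp (fun h => lt_of_le_of_ne h.1 h.2)

theorem pv_uni_run (dados : List Int) : pvHasRun (pvUni dados) ↔ pvHasRun dados := by
  unfold pvHasRun
  constructor
  · rintro ⟨v, h0, h1, h2, h3, h4⟩
    exact ⟨v, (pv_uni_mem _ _).mp h0, (pv_uni_mem _ _).mp h1, (pv_uni_mem _ _).mp h2,
      (pv_uni_mem _ _).mp h3, (pv_uni_mem _ _).mp h4⟩
  · rintro ⟨v, h0, h1, h2, h3, h4⟩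
    exact ⟨v, (pv_uni_mem _ _).mpr h0, (pv_uni_mem _ _).mpr h1, (pv_uni_mem _ _).mpr h2,
      (pv_uni_mem _ _).mpr h3, (pv_uni_mem _ _).mpr h4⟩

theorem pv_uni_length_le (dados : List Int) : (pvUni dados).length ≤ dados.length := by
  have key : ∀ (l : List Int) (acc : List Int),
      (l.foldl (fun acc dado => if dado ∈ acc then acc else acc ++ [dado]) acc).length ≤
        acc.length + l.length := by
    intro l
    induction l with
    | nil => simp
    | cons b t ih =>
        intro acc
        simp only [List.foldl_cons, List.length_cons]
        by_cases hb : b ∈ acc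
        · rw [if_pos hb]
          exact (ih acc).trans (by omega)
        · rw [if_neg hb]
          have := ih (acc ++ [b])
          simp only [List.length_append, List.length_singleton] at this
          omega
  have h1 := key (PySem.List.sorted dados (fun x => x) false) []
  unfold pvUni
  simpa [PySem.List.length_sorted] using h1

-- A returns 30 exactly on pvHasRun …
theorem pv_a_thirty (dados : List Int) :
    calcula_pontos_sequencia_alta dados = 30 ↔ pvHasRun dados := by
  unfold calcula_pontos_sequencia_alta
  by_cases hlen : dados.length < 5
  · rw [if_pos hlen]
    constructor
    · intro h; norm_num at h
    · intro hrun
      exfalso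
      have h30 : pvScanA (pvUni dados) = 30 :=
        pv_run_scan_thirty _ (pv_uni_pairwise dados) ((pv_uni_run dados).mpr hrun)
      have hle := pv_uni_length_le dados
      rw [pv_scan_short _ (by omega)] at h30
      norm_num at h30
  · rw [if_neg hlen]
    show (if (pvUni dados).length < 5 then (0 : Int) else pvScanA (pvUni dados)) = 30 ↔ _
    by_cases hu : (pvUni dados).length < 5
    · rw [if_pos hu]
      constructor
      · intro h; norm_num at h
      · intro hrun
        exfalso
        have h30 : pvScanA (pvUni dados) = 30 :=
          pv_run_scan_thirty _ (pv_uni_pairwise dados) ((pv_uni_run dados).mpr hrun)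
        rw [pv_scan_short _ hu] at h30
        norm_num at h30
    · rw [if_neg hu]
      constructor
      · intro h
        exact (pv_uni_run dados).mp (pv_scan_thirty_run _ h)
      · intro hrun
        exact pv_run_scan_thirty _ (pv_uni_pairwise dados) ((pv_uni_run dados).mpr hrun)

-- … and is always 0 or 30
theorem pv_a_cases (dados : List Int) :
    calcula_pontos_sequencia_alta dados = 0 ∨ calcula_pontos_sequencia_alta dados = 30 := by
  unfold calcula_pontos_sequencia_alta
  by_cases hlen : dados.length < 5
  · rw [if_pos hlen]; left; rfl
  · rw [if_neg hlen]
    show (if (pvUni dados).length < 5 then (0 : Int) else pvScanA (pvUni dados)) = 0 ∨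
      (if (pvUni dados).length < 5 then (0 : Int) else pvScanA (pvUni dados)) = 30
    by_cases hu : (pvUni dados).length < 5
    · rw [if_pos hu]; left; rfl
    · rw [if_neg hu]
      exact pv_scan_zero_or_thirty (pvUni dados)

-- ===== VERDICT (by name: the statement is the Claim_ definition above) =====
theorem calcula_pontos_sequencia_alta_spec : Claim_equal_calcula_pontos_sequencia_alta := by
  intro dados _
  show calcula_pontos_sequencia_alta dados = calcula_pontos_sequencia_alta_alt dados
  rcases pv_a_cases dados with hA | hA <;> rcases pv_alt_cases dados with hB | hB
  · rw [hA, hB]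
  · exfalso
    have hrun := (pv_alt_thirty dados).mp hB
    have := (pv_a_thirty dados).mpr hrun
    rw [hA] at this; norm_num at this
  · exfalso
    have hrun := (pv_a_thirty dados).mp hA
    have := (pv_alt_thirty dados).mpr hrun
    rw [hB] at this; norm_num at this
  · rw [hA, hB]
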